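-- pv_equiv track=rewrite | github.com/arwindersngh62/advent_of_code | week3/solution_2.py | get_symbol_indices
-- ===== SOURCE A (Python) =====
-- special_characters = "!@#$%^&*()-+?_=,<>/"
--
-- def get_symbol_indices(line):
--     column = 0
--     all_symbol = []
--     for letter in line:
--         if letter in special_characters:
--             all_symbol.append((letter, column))
--         column+=1
--     return all_symbol
-- ===== SOURCE B (Python) =====
-- special_characters = "!@#$%^&*()-+?_=,<>/"
--
-- def get_symbol_indices(line):
--     # per-symbol scan: collect occurrences of each special character, then order by column
--     hits = []
--     for ch in special_characters:
--         for i, c in enumerate(line):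
--             if c == ch:
--                 hits.append((ch, i))
--     hits.sort(key=lambda t: t[1])
--     return hits
-- ===== Notes on version B (the rewrite author's own statement) =====
-- stated objective: alternative
-- what changed: B scans the line once per special character collecting that character's occurrences, then sorts all hits by column, instead of A's single indexed pass with a membership test per character.
import Mathlib
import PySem

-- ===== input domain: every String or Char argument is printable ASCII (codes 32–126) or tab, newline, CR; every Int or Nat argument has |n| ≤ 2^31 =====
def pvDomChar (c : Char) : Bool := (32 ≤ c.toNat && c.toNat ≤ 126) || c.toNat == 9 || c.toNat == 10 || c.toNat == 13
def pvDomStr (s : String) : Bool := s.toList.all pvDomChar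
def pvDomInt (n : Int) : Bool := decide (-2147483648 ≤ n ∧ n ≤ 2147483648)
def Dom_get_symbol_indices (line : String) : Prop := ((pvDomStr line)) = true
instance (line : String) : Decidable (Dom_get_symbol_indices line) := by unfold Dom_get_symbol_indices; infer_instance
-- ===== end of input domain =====

-- B differs from A in structure only: per-symbol scans plus a final sort by column, same values.

-- ===== PORT A =====
def pvSpecials : List Char := "!@#$%^&*()-+?_=,<>/".toList

-- A: one indexed pass over the line, appending (letter, column) when letter is special.
def get_symbol_indices (line : String) : List (String × Int) :=
  (line.toList.foldl
    (fun (st : Int × List (String × Int)) letter =>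
      ( st.1 + 1
      , if pvSpecials.contains letter then st.2 ++ [(String.ofList [letter], st.1)] else st.2))
    (0, [])).2

-- ===== PORT B =====
-- B: for each special character, scan the line for its occurrences; then sort the hits by column.
def get_symbol_indices_alt (line : String) : List (String × Int) :=
  let hits := pvSpecials.foldl
    (fun acc ch =>
      (PySem.List.enumerate line.toList).foldl
        (fun a p => if p.2 == ch then a ++ [(String.ofList [ch], p.1)] else a) acc)
    []
  PySem.List.sorted hits (fun t => t.2) false

-- ===== PRECONDITION & SPEC =====
def Spec_get_symbol_indices (line : String) (out : List (String × Int)) : Prop := out = get_symbol_indices_alt line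
instance (line : String) (out : List (String × Int)) : Decidable (Spec_get_symbol_indices line out) := by unfold Spec_get_symbol_indices; infer_instance

-- ===== CLAIM (what is proved, stated in full; the proofs are below) =====
def Claim_equal_get_symbol_indices : Prop := ∀ (line : String), Dom_get_symbol_indices line → Spec_get_symbol_indices line (get_symbol_indices line)

-- ===== LEMMAS AND PROOFS =====

-- canonical form: the hits in line order
def pvCanon (l : List Char) : List (String × Int) :=
  ((PySem.List.enumerate l).filter (fun p => pvSpecials.contains p.2)).map
    (fun p => (String.ofList [p.2], p.1))

lemma lemA (l : List Char) : ∀ (col : Int) (acc : List (String × Int)),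
    (l.foldl
      (fun (st : Int × List (String × Int)) letter =>
        ( st.1 + 1
        , if pvSpecials.contains letter then st.2 ++ [(String.ofList [letter], st.1)] else st.2))
      (col, acc)).2
    = acc ++ ((PySem.List.enumerate l col).filter (fun p => pvSpecials.contains p.2)).map
        (fun p => (String.ofList [p.2], p.1)) := by
  induction l with
  | nil => intro col acc; simp [PySem.List.enumerate_nil]
  | cons a t ih =>
    intro col acc
    simp only [List.foldl_cons, PySem.List.enumerate_cons, List.filter_cons]
    rw [ih]
    by_cases h : a ∈ pvSpecials
    · simp [h, List.append_assoc]
    · simp [h]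

-- disjoint filters split a disjunctive filter, up to permutation
lemma perm_filter_or {α : Type} (q r : α → Bool) (hdis : ∀ x, ¬(q x = true ∧ r x = true)) :
    ∀ (l : List α), (l.filter (fun x => q x || r x)).Perm (l.filter q ++ l.filter r) := by
  intro l
  induction l with
  | nil => simp
  | cons a t ih =>
    by_cases hq : q a
    · have hr : ¬ r a = true := fun hr => hdis a ⟨hq, hr⟩
      simpa [List.filter_cons, hq, hr] using ih.cons a
    · by_cases hr : r a
      · have e1 : List.filter (fun x => q x || r x) (a :: t)
            = a :: t.filter (fun x => q x || r x) := by
          simp [hq, hr]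
        have e2 : (a :: t).filter q ++ (a :: t).filter r
            = t.filter q ++ a :: t.filter r := by
          simp [hq, hr]
        rw [e1, e2]
        exact (ih.cons a).trans List.perm_middle.symm
      · simpa [List.filter_cons, hq, hr] using ih

lemma perm_flatMap_filter (l : List (Int × Char)) :
    ∀ (cs : List Char), cs.Nodup →
    (l.filter (fun p => cs.contains p.2)).Perm
      (cs.flatMap (fun ch => l.filter (fun p => p.2 == ch))) := by
  intro cs
  induction cs with
  | nil => simp
  | cons c cs' ih =>
    intro hnd
    have hnd' := hnd.of_cons
    have hc : c ∉ cs' := by simpa using (List.nodup_cons.mp hnd).1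
    have h1 : (l.filter (fun p => (c :: cs').contains p.2)).Perm
        (l.filter (fun p => p.2 == c) ++ l.filter (fun p => cs'.contains p.2)) := by
      have := perm_filter_or (fun p : Int × Char => p.2 == c)
        (fun p : Int × Char => cs'.contains p.2)
        (by intro p ⟨h1, h2⟩
            exact hc (by simpa [eq_of_beq h1] using h2)) l
      simpa [List.contains_cons] using this
    refine h1.trans ?_
    simpa [List.flatMap_cons] using (List.Perm.append_left _ (ih hnd'))

lemma lemB_hits (l : List Char) :
    pvSpecials.foldl
      (fun acc ch =>
        (PySem.List.enumerate l).foldl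
          (fun a p => if p.2 == ch then a ++ [(String.ofList [ch], p.1)] else a) acc)
      []
    = pvSpecials.flatMap (fun ch =>
        ((PySem.List.enumerate l).filter (fun p => p.2 == ch)).map
          (fun p => (String.ofList [p.2], p.1))) := by
  have hstep : ∀ (acc : List (String × Int)) (ch : Char), ch ∈ pvSpecials →
      (PySem.List.enumerate l).foldl
        (fun a p => if p.2 == ch then a ++ [(String.ofList [ch], p.1)] else a) acc
      = acc ++ ((PySem.List.enumerate l).filter (fun p => p.2 == ch)).map
          (fun p => (String.ofList [p.2], p.1)) := by
    intro acc ch _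
    rw [PySem.List.foldl_append_if (p := fun p : Int × Char => p.2 == ch)
      (f := fun p => (String.ofList [ch], p.1))]
    congr 1
    refine List.map_congr_left ?_
    intro p hp
    have : p.2 = ch := by
      have := (List.mem_filter.mp hp).2
      exact eq_of_beq this
    simp [this]
  have h1 : pvSpecials.foldl
      (fun acc ch =>
        (PySem.List.enumerate l).foldl
          (fun a p => if p.2 == ch then a ++ [(String.ofList [ch], p.1)] else a) acc)
      []
    = pvSpecials.foldl
      (fun acc ch =>
        acc ++ ((PySem.List.enumerate l).filter (fun p => p.2 == ch)).map
          (fun p => (String.ofList [p.2], p.1)))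
      [] := PySem.List.foldl_congr_mem pvSpecials _ _ _ (fun acc x hx => hstep acc x hx)
  refine h1.trans ?_
  simpa using PySem.List.foldl_append_eq_flatMap
    (g := fun ch => ((PySem.List.enumerate l).filter (fun p => p.2 == ch)).map
      (fun p => (String.ofList [p.2], p.1))) (l := pvSpecials) (acc := [])

lemma canon_pairwise (l : List Char) :
    (pvCanon l).Pairwise (fun a b => a.2 < b.2) := by
  unfold pvCanon
  rw [List.pairwise_map]
  exact List.Pairwise.filter _ (PySem.List.pairwise_lt_enumerate l 0)

lemma canon_perm_hits (l : List Char) :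
    (pvCanon l).Perm
      (pvSpecials.flatMap (fun ch =>
        ((PySem.List.enumerate l).filter (fun p => p.2 == ch)).map
          (fun p => (String.ofList [p.2], p.1)))) := by
  unfold pvCanon
  rw [← List.map_flatMap]
  exact List.Perm.map _ (perm_flatMap_filter (PySem.List.enumerate l) pvSpecials (by decide))

-- ===== VERDICT (by name: the statement is the Claim_ definition above) =====
theorem get_symbol_indices_spec : Claim_equal_get_symbol_indices := by
  intro line _
  unfold Spec_get_symbol_indices get_symbol_indices get_symbol_indices_alt
  rw [lemA line.toList 0 [], lemB_hits line.toList]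
  simp only [List.nil_append]
  exact (PySem.List.sorted_eq_of_perm_of_pairwise_lt _ _ (fun t : String × Int => t.2)
    (canon_perm_hits line.toList) (canon_pairwise line.toList)).symm
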